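-- pv_equiv track=rewrite | github.com/superhellth/ds-project-wc2022 | ex2/regex_validator.py | verify_regex
-- ===== SOURCE A (Python) =====
-- VALID_CHARS = "ABCDEFGHIJKLMNOPQRSTUVWXYZÄÜÖß0123456789 "
--
-- VALID_SPECIAL = "^|*+?"
--
-- VALID_BRACKETS = "()"
--
-- def split_string(string):
--     """Splits string into char array"""
--     string_array = []
--     string_array.extend(string)
--     return string_array
--
-- def to_upper(char):
--     """Returns the uppercased letter"""
--     if char != "ß":
--         return char.upper()
--     else:
--         return char
--
-- def upper_string(string):
--     """Converts string to array of upper case letters"""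
--     string_array = split_string(string)
--     for i, char in enumerate(string_array):
--         string_array[i] = to_upper(char)
--     return string_array
--
-- def verify_regex(expr):
--     """Our main verification method"""
--     # To keep track of brackets
--     stack = []
--
--     # Check if string is None
--     if expr is None:
--         return False
--
--     # Handle potential unicode
--     expr = expr.encode('ascii', errors='backslashreplace')
--     expr = expr.decode('ascii')
--
--     # Pre-proccessing: Transform string to uppercased char array
--     regex_array = upper_string(expr)
--
--     # This flag is to make sure special characters don't appear immediately after each other
--     flag_special = False
--
--     # Iterate Char Array
--     for char in regex_array:
--         if char in VALID_CHARS: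
--             flag_special = False
--         elif char in VALID_SPECIAL:
--             if not flag_special:
--                 flag_special = True
--             else:
--                 return False
--         elif char in VALID_BRACKETS:
--             if char == "(":
--                 stack.append("a")
--             elif char == ")" and len(stack) > 0:
--                 stack.pop()
--             else:
--                 return False
--         else:
--             return False
--     if len(stack) == 0:
--         return True
--     return False
-- ===== SOURCE B (Python) =====
-- VALID_CHARS = "ABCDEFGHIJKLMNOPQRSTUVWXYZÄÜÖß0123456789 "
--
-- VALID_SPECIAL = "^|*+?"
--
-- VALID_BRACKETS = "()"
--
-- def verify_regex(expr):
--     """Three independent checks over the uppercased char array."""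
--     if expr is None:
--         return False
--     expr = expr.encode('ascii', errors='backslashreplace').decode('ascii')
--     arr = [c if c == "ß" else c.upper() for c in expr]
--
--     # (1) every char belongs to one of the three alphabets
--     ok_chars = all(c in VALID_CHARS + VALID_SPECIAL + VALID_BRACKETS for c in arr)
--
--     # (2) no two special characters separated only by brackets
--     ok_special = True
--     flag = False
--     for c in arr:
--         if c in VALID_CHARS:
--             flag = False
--         elif c in VALID_SPECIAL:
--             if flag:
--                 ok_special = False
--                 break
--             flag = True
--
--     # (3) bracket balance via a depth counter
--     ok_bal = True
--     depth = 0
--     for c in arr: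
--         if c == "(":
--             depth += 1
--         elif c == ")":
--             if depth == 0:
--                 ok_bal = False
--                 break
--             depth -= 1
--     ok_bal = ok_bal and depth == 0
--
--     return ok_chars and ok_special and ok_bal
-- ===== Notes on version B (the rewrite author's own statement) =====
-- stated objective: alternative
-- what changed: Replaced A's single early-return loop with an explicit stack by three independent scans over the char array (alphabet membership, special-adjacency flag, integer depth counter for brackets) whose conjunction is the result.
import Mathlib
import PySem

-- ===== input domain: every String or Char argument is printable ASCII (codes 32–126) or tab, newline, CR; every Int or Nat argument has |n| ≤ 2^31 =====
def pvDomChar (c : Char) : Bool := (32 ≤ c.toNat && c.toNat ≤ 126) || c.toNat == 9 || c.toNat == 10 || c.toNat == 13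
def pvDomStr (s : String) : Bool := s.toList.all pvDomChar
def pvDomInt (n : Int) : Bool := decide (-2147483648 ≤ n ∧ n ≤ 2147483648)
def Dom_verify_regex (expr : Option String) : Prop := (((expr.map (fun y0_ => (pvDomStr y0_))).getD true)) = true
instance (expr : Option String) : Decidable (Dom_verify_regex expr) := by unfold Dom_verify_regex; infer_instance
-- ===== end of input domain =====

-- B replaces A's single early-return loop (stack + flag) by three independent scans
-- whose conjunction is the result; same O(n) cost, different decomposition.
-- On Dom (ASCII input) expr.encode('ascii','backslashreplace').decode('ascii') is the
-- identity, so both ports omit it (exact on the stated ASCII domain).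

-- ===== PORT A =====
def pvVALID_CHARS : String := "ABCDEFGHIJKLMNOPQRSTUVWXYZÄÜÖß0123456789 "
def pvVALID_SPECIAL : String := "^|*+?"
def pvVALID_BRACKETS : String := "()"

-- to_upper: Python's char.upper() on a single ASCII char = Char.toUpper (exact on Dom)
def pvToUpperA (c : Char) : Char := if c ≠ 'ß' then c.toUpper else c

-- upper_string: split to char array and uppercase each element
def pvUpperStringA (s : String) : List Char := s.toList.map pvToUpperA

-- the main for-loop of verify_regex, with the stack and flag as state
def pvLoopA : List Char → List String → Bool → Bool
  | [], stack, _ => stack.length == 0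
  | c :: cs, stack, flag =>
    if pvVALID_CHARS.toList.contains c then pvLoopA cs stack false
    else if pvVALID_SPECIAL.toList.contains c then
      if !flag then pvLoopA cs stack true else false
    else if pvVALID_BRACKETS.toList.contains c then
      if c = '(' then pvLoopA cs ("a" :: stack) flag
      else if c = ')' ∧ stack.length > 0 then pvLoopA cs stack.tail flag
      else false
    else false

def verify_regex (expr : Option String) : Bool :=
  match expr with
  | none => false
  | some s => pvLoopA (pvUpperStringA s) [] false

-- ===== PORT B =====
-- check (1): every char in the union of the three alphabets
def pvAllValidB (arr : List Char) : Bool :=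
  arr.all (fun c => (pvVALID_CHARS ++ pvVALID_SPECIAL ++ pvVALID_BRACKETS).toList.contains c)

-- check (2): the special-adjacency flag scan
def pvSpecialScanB : List Char → Bool → Bool
  | [], _ => true
  | c :: cs, flag =>
    if pvVALID_CHARS.toList.contains c then pvSpecialScanB cs false
    else if pvVALID_SPECIAL.toList.contains c then
      if flag then false else pvSpecialScanB cs true
    else pvSpecialScanB cs flag

-- check (3): bracket balance via a depth counter (final depth must be 0)
def pvBalScanB : List Char → Nat → Bool
  | [], d => d == 0
  | c :: cs, d =>
    if c = '(' then pvBalScanB cs (d + 1)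
    else if c = ')' then (if d = 0 then false else pvBalScanB cs (d - 1))
    else pvBalScanB cs d

def verify_regex_alt (expr : Option String) : Bool :=
  match expr with
  | none => false
  | some s =>
    let arr := s.toList.map (fun c => if c = 'ß' then c else c.toUpper)
    pvAllValidB arr && pvSpecialScanB arr false && pvBalScanB arr 0

-- ===== PRECONDITION & SPEC =====
def Spec_verify_regex (expr : Option String) (out : Bool) : Prop := out = verify_regex_alt expr
instance (expr : Option String) (out : Bool) : Decidable (Spec_verify_regex expr out) := by unfold Spec_verify_regex; infer_instance

-- ===== CLAIM (what is proved, stated in full; the proofs are below) =====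
def Claim_equal_verify_regex : Prop := ∀ (expr : Option String), Dom_verify_regex expr → Spec_verify_regex expr (verify_regex expr)

-- ===== LEMMAS AND PROOFS =====

theorem pvUnion_contains (c : Char) :
    (pvVALID_CHARS ++ pvVALID_SPECIAL ++ pvVALID_BRACKETS).toList.contains c =
      (pvVALID_CHARS.toList.contains c || pvVALID_SPECIAL.toList.contains c ||
        pvVALID_BRACKETS.toList.contains c) := by
  simp [String.toList_append, Bool.or_assoc]

theorem pvLoopA_decompose (cs : List Char) :
    ∀ (stack : List String) (flag : Bool),
    pvLoopA cs stack flag =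
      (pvAllValidB cs && pvSpecialScanB cs flag && pvBalScanB cs stack.length) := by
  induction cs with
  | nil =>
    intro stack flag
    simp [pvLoopA, pvAllValidB, pvSpecialScanB, pvBalScanB]
  | cons c cs ih =>
    intro stack flag
    by_cases h1 : pvVALID_CHARS.toList.contains c
    · have hop : c ≠ '(' := by rintro rfl; revert h1; decide
      have hcl : c ≠ ')' := by rintro rfl; revert h1; decide
      simp only [pvLoopA, pvAllValidB, pvSpecialScanB, pvBalScanB, List.all_cons,
        pvUnion_contains, h1, if_pos, if_neg hop, if_neg hcl, Bool.true_or,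
        Bool.true_and, List.contains_iff_mem] at *
      simp [ih]
    · by_cases h2 : pvVALID_SPECIAL.toList.contains c
      · have hop : c ≠ '(' := by rintro rfl; revert h2; decide
        have hcl : c ≠ ')' := by rintro rfl; revert h2; decide
        simp only [pvLoopA, pvAllValidB, pvSpecialScanB, pvBalScanB, List.all_cons,
          pvUnion_contains, List.contains_iff_mem] at *
        cases flag with
        | false => simp [h1, h2, hop, hcl, ih]
        | true => simp [h1, h2, hop, hcl]
      · by_cases h3 : pvVALID_BRACKETS.toList.contains c
        · have hc : c = '(' ∨ c = ')' := by
            revert h3; simp [pvVALID_BRACKETS]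
          rcases hc with rfl | rfl
          · simp only [pvLoopA, pvAllValidB, pvSpecialScanB, pvBalScanB, List.all_cons,
              pvUnion_contains, List.contains_iff_mem] at *
            simp [h1, h2, h3, ih]
          · cases stack with
            | nil =>
              simp only [pvLoopA, pvAllValidB, pvSpecialScanB, pvBalScanB, List.all_cons,
                pvUnion_contains, List.contains_iff_mem] at *
              simp [h1, h2, h3]
            | cons a stack =>
              simp only [pvLoopA, pvAllValidB, pvSpecialScanB, pvBalScanB, List.all_cons,
                pvUnion_contains, List.contains_iff_mem] at *
              simp [h1, h2, h3, ih]
        · have hop : c ≠ '(' := by rintro rfl; revert h3; decide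
          have hcl : c ≠ ')' := by rintro rfl; revert h3; decide
          simp only [pvLoopA, pvAllValidB, pvSpecialScanB, pvBalScanB, List.all_cons,
            pvUnion_contains, List.contains_iff_mem] at *
          simp [h1, h2, h3, hop, hcl]

theorem pvUpper_eq (s : String) :
    pvUpperStringA s = s.toList.map (fun c => if c = 'ß' then c else c.toUpper) := by
  unfold pvUpperStringA pvToUpperA
  apply List.map_congr_left
  intro c _
  by_cases h : c = 'ß' <;> simp [h]

-- ===== VERDICT (by name: the statement is the Claim_ definition above) =====
theorem verify_regex_spec : Claim_equal_verify_regex := by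
  intro expr _
  unfold Spec_verify_regex
  cases expr with
  | none => rfl
  | some s =>
    show pvLoopA (pvUpperStringA s) [] false = _
    rw [pvUpper_eq, pvLoopA_decompose]
    rfl
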